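-- pv_equiv track=rewrite | github.com/ameliabrennan/networks | NetworkMapV1_3.py | create_get_class_details_qry
-- ===== SOURCE A (Python) =====
-- def create_get_class_details_qry(classkeys=[],  term_codes=[], course_codes=[],
--                                   acad_career=None, school=None, college=None,
--                                   campus=None, foe_description=None):
--
--     qry = 'SELECT * ' \
--           'FROM Class_details '
--
--     # Add WHERE statements if necessary
--     if (len(classkeys) > 0
--         or len(term_codes) > 0
--         or len(course_codes) > 0
--         or acad_career != None
--         or school != None
--         or college != None
--         or campus != None
--         or foe_description != None):
--
--         qry += 'WHERE ( '
--
--         if len(classkeys) > 0: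
--             qry += ' ( '
--             # Add each program
--             for classkey in classkeys:
--                 qry += 'classkey = "%s" OR ' % classkey
--             # remove last 'OR '
--             qry = qry[:-3]
--             qry += ' ) AND '
--
--         if len(term_codes) > 0:
--             qry += ' ( '
--             # Add each program
--             for term_code in term_codes:
--                 qry += 'term_code = "%s" OR ' % term_code
--             # remove last 'OR '
--             qry = qry[:-3]
--             qry += ' ) AND '
--
--         if len(course_codes) > 0:
--             qry += ' ( '
--             # Add each program
--             for course_code in course_codes:
--                 qry += 'course_code = "%s" OR ' % course_code
--             # remove last 'OR '
--             qry = qry[:-3]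
--             qry += ' ) AND '
--
--
--         if acad_career != None:
--             qry += ' course_acad_career = "%s" AND ' % acad_career
--
--         if school != None:
--             qry += ' course_school = "%s" AND ' % school
--
--         if college != None:
--             qry += ' course_college = "%s" AND ' % college
--
--         if campus != None:
--             qry += ' course_campus = "%s" AND ' % campus
--
--         if foe_description != None:
--             qry += ' course_foe = "%s" AND ' % foe_description
--
--         # remove last 'AND '
--         qry = qry[:-4]
--         qry += ' ) '
--
--     qry += 'ORDER BY classkey '
--     return qry
-- ===== SOURCE B (Python) =====
-- def create_get_class_details_qry(classkeys=[], term_codes=[], course_codes=[],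
--                                  acad_career=None, school=None, college=None,
--                                  campus=None, foe_description=None):
--     cores = []
--     for field, vals in (('classkey', classkeys), ('term_code', term_codes),
--                         ('course_code', course_codes)):
--         if vals:
--             cores.append(' ( ' + ' OR '.join('%s = "%s"' % (field, v) for v in vals) + '  ) ')
--     for field, val in (('course_acad_career', acad_career), ('course_school', school),
--                        ('course_college', college), ('course_campus', campus),
--                        ('course_foe', foe_description)):
--         if val is not None:
--             cores.append(' %s = "%s" ' % (field, val))
--     qry = 'SELECT * FROM Class_details '
--     if cores:
--         qry += 'WHERE ( ' + 'AND '.join(cores) + ' ) '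
--     return qry + 'ORDER BY classkey '
-- ===== Notes on version B (the rewrite author's own statement) =====
-- stated objective: simpler
-- what changed: B collects per-filter condition fragments into a list and joins them once ('AND '.join / ' OR '.join), replacing A's incremental string concatenation with trailing-separator slicing (qry[:-3]/qry[:-4]) and the big entry guard.
import Mathlib
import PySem

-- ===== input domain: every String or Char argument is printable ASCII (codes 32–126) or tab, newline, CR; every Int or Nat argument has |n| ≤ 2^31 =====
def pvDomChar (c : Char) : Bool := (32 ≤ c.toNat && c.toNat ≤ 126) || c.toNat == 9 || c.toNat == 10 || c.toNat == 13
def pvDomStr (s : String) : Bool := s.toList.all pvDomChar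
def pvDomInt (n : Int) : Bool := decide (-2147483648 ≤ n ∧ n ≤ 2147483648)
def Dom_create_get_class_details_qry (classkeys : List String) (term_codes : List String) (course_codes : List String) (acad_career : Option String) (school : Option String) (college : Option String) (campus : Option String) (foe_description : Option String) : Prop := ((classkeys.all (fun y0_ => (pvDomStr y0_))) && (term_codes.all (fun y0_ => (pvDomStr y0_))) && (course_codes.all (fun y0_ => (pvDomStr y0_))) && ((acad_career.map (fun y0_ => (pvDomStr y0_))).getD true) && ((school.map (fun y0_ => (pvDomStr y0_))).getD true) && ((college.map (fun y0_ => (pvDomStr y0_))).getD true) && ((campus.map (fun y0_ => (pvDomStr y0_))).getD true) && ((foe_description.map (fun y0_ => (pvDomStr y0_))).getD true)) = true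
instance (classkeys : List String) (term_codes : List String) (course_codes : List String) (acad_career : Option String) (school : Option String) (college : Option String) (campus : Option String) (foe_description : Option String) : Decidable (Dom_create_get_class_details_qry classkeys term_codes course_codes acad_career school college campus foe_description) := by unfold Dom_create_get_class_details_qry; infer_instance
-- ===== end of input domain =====

-- B replaces A's append-then-trim string building by collecting condition fragments and joining them once (objective: simpler).

-- ===== PORT A =====
-- qry[:-3]  (remove last 'OR ')
def pvA_trim3 (q : List Char) : List Char := q.take (q.length - 3)

-- A's three identical classkey/term_code/course_code blocks, parameterised by the column name
def pvA_group (field : List Char) (vals : List String) (qry : List Char) : List Char :=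
  if vals.length > 0 then
    -- qry += ' ( ';  the for-loop;  qry = qry[:-3] (remove last 'OR ');  qry += ' ) AND '
    pvA_trim3
      (vals.foldl (fun a v => a ++ (field ++ " = \"".toList ++ v.toList ++ "\" OR ".toList))
        (qry ++ " ( ".toList)) ++ " ) AND ".toList
  else qry

-- A's five identical scalar-filter blocks, parameterised by the column name
def pvA_scalar (field : List Char) (val : Option String) (qry : List Char) : List Char :=
  match val with
  | some v => qry ++ (" ".toList ++ field ++ " = \"".toList ++ v.toList ++ "\" AND ".toList)
  | none => qry

-- qry[:-4]  (remove last 'AND ')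
def pvA_trim4 (q : List Char) : List Char := q.take (q.length - 4)

def create_get_class_details_qry (classkeys : List String) (term_codes : List String) (course_codes : List String) (acad_career : Option String) (school : Option String) (college : Option String) (campus : Option String) (foe_description : Option String) : String :=
  String.ofList
    ((if classkeys.length > 0 ∨ term_codes.length > 0 ∨ course_codes.length > 0 ∨
       acad_career.isSome ∨ school.isSome ∨ college.isSome ∨ campus.isSome ∨
       foe_description.isSome then
      pvA_trim4
        (pvA_scalar "course_foe".toList foe_description
          (pvA_scalar "course_campus".toList campus
            (pvA_scalar "course_college".toList college
              (pvA_scalar "course_school".toList school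
                (pvA_scalar "course_acad_career".toList acad_career
                  (pvA_group "course_code".toList course_codes
                    (pvA_group "term_code".toList term_codes
                      (pvA_group "classkey".toList classkeys
                        ("SELECT * FROM Class_details ".toList ++ "WHERE ( ".toList))))))))) ++ " ) ".toList
     else "SELECT * FROM Class_details ".toList)
     ++ "ORDER BY classkey ".toList)

-- ===== PORT B =====
-- '%s = "%s"' % (field, v)
def pvB_item (field : List Char) (v : String) : List Char :=
  field ++ " = \"".toList ++ v.toList ++ "\"".toList

-- ' ( ' + ' OR '.join('%s = "%s"' % (field, v) for v in vals) + '  ) '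
def pvB_groupCore (field : List Char) (vals : List String) : List Char :=
  " ( ".toList ++ PySem.Chars.join " OR ".toList (vals.map (pvB_item field)) ++ "  ) ".toList

-- ' %s = "%s" ' % (field, val)
def pvB_scalarCore (field : List Char) (v : String) : List Char :=
  " ".toList ++ field ++ " = \"".toList ++ v.toList ++ "\" ".toList

def pvB_groupOpt (field : List Char) (vals : List String) : List (List Char) :=
  if vals.isEmpty then [] else [pvB_groupCore field vals]

def pvB_scalarOpt (field : List Char) (val : Option String) : List (List Char) :=
  match val with
  | some v => [pvB_scalarCore field v]
  | none => []

def pvB_cores (classkeys : List String) (term_codes : List String) (course_codes : List String) (acad_career : Option String) (school : Option String) (college : Option String) (campus : Option String) (foe_description : Option String) : List (List Char) :=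
  pvB_groupOpt "classkey".toList classkeys ++
  pvB_groupOpt "term_code".toList term_codes ++
  pvB_groupOpt "course_code".toList course_codes ++
  pvB_scalarOpt "course_acad_career".toList acad_career ++
  pvB_scalarOpt "course_school".toList school ++
  pvB_scalarOpt "course_college".toList college ++
  pvB_scalarOpt "course_campus".toList campus ++
  pvB_scalarOpt "course_foe".toList foe_description

def create_get_class_details_qry_alt (classkeys : List String) (term_codes : List String) (course_codes : List String) (acad_career : Option String) (school : Option String) (college : Option String) (campus : Option String) (foe_description : Option String) : String :=
  String.ofList
    ((if (pvB_cores classkeys term_codes course_codes acad_career school college campus foe_description).isEmpty then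
        "SELECT * FROM Class_details ".toList
      else
        "SELECT * FROM Class_details ".toList ++ "WHERE ( ".toList ++
          PySem.Chars.join "AND ".toList
            (pvB_cores classkeys term_codes course_codes acad_career school college campus foe_description) ++
          " ) ".toList)
     ++ "ORDER BY classkey ".toList)

-- ===== PRECONDITION & SPEC =====
def Spec_create_get_class_details_qry (classkeys : List String) (term_codes : List String) (course_codes : List String) (acad_career : Option String) (school : Option String) (college : Option String) (campus : Option String) (foe_description : Option String) (out : String) : Prop := out = create_get_class_details_qry_alt classkeys term_codes course_codes acad_career school college campus foe_description
instance (classkeys : List String) (term_codes : List String) (course_codes : List String) (acad_career : Option String) (school : Option String) (college : Option String) (campus : Option String) (foe_description : Option String) (out : String) : Decidable (Spec_create_get_class_details_qry classkeys term_codes course_codes acad_career school college campus foe_description out) := by unfold Spec_create_get_class_details_qry; infer_instance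

-- ===== CLAIM (what is proved, stated in full; the proofs are below) =====
def Claim_equal_create_get_class_details_qry : Prop := ∀ (classkeys : List String) (term_codes : List String) (course_codes : List String) (acad_career : Option String) (school : Option String) (college : Option String) (campus : Option String) (foe_description : Option String), Dom_create_get_class_details_qry classkeys term_codes course_codes acad_career school college campus foe_description → Spec_create_get_class_details_qry classkeys term_codes course_codes acad_career school college campus foe_description (create_get_class_details_qry classkeys term_codes course_codes acad_career school college campus foe_description)

-- ===== LEMMAS AND PROOFS =====

-- Python s[:-3] / s[:-4] on a string ending in the 3-/4-char separator just removes it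
lemma pv_take_sub (xs s : List Char) (n : Nat) (h : s.length = n) :
    (xs ++ s).take ((xs ++ s).length - n) = xs := by
  rw [List.length_append, h, Nat.add_sub_cancel]
  exact List.take_left ..

-- concatenating fragment-plus-separator over a NONEMPTY list is join-then-trailing-separator
lemma pv_flat_sep (sep : List Char) : ∀ (c : List Char) (F : List (List Char)),
    ((c :: F).map (· ++ sep)).flatten = PySem.Chars.join sep (c :: F) ++ sep := by
  intro c F
  induction F generalizing c with
  | nil => simp [PySem.Chars.join_singleton]
  | cons d F ih =>
      simp only [List.map_cons, List.flatten_cons] at ih ⊢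
      rw [ih d, PySem.Chars.join_cons_cons]
      simp [List.append_assoc]

lemma pv_flat_sep' (sep : List Char) (F : List (List Char)) (h : F ≠ []) :
    (F.map (· ++ sep)).flatten = PySem.Chars.join sep F ++ sep := by
  obtain ⟨c, F', rfl⟩ := List.exists_cons_of_ne_nil h
  exact pv_flat_sep sep c F'

lemma pvA_group_eq (field : List Char) (vals : List String) (q : List Char) :
    pvA_group field vals q =
      q ++ ((pvB_groupOpt field vals).map (· ++ "AND ".toList)).flatten := by
  cases vals with
  | nil => simp [pvA_group, pvB_groupOpt]
  | cons v vs =>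
      rw [pvA_group, if_pos (by simp)]
      unfold pvA_trim3
      rw [PySem.List.foldl_append_eq_flatMap
            (fun v => field ++ " = \"".toList ++ v.toList ++ "\" OR ".toList) (v :: vs),
          List.flatMap_def]
      have hsplit : (fun w : String => field ++ " = \"".toList ++ w.toList ++ "\" OR ".toList)
          = fun w => pvB_item field w ++ " OR ".toList := by
        funext w
        have h : ("\" OR ".toList : List Char) = "\"".toList ++ " OR ".toList := by decide
        simp [pvB_item, h, List.append_assoc]
      rw [hsplit,
          show (fun w : String => pvB_item field w ++ " OR ".toList)
             = ((· ++ " OR ".toList) ∘ pvB_item field) from rfl,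
          ← List.map_map]
      rw [pv_flat_sep' " OR ".toList ((v :: vs).map (pvB_item field)) (by simp)]
      have hOR : (" OR ".toList : List Char) = [' '] ++ "OR ".toList := by decide
      rw [hOR]
      simp only [← List.append_assoc]
      rw [pv_take_sub _ "OR ".toList 3 (by decide)]
      have h1 : ("  ) ".toList : List Char) = [' '] ++ " ) ".toList := by decide
      have h2 : (" ) AND ".toList : List Char) = " ) ".toList ++ "AND ".toList := by decide
      simp [pvB_groupOpt, pvB_groupCore, h1, h2, List.append_assoc]

lemma pvA_scalar_eq (field : List Char) (val : Option String) (q : List Char) :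
    pvA_scalar field val q =
      q ++ ((pvB_scalarOpt field val).map (· ++ "AND ".toList)).flatten := by
  cases val with
  | none => simp [pvA_scalar, pvB_scalarOpt]
  | some v =>
      have h : ("\" AND ".toList : List Char) = "\" ".toList ++ "AND ".toList := by decide
      simp [pvA_scalar, pvB_scalarOpt, pvB_scalarCore, h, List.append_assoc]

-- ===== VERDICT (by name: the statement is the Claim_ definition above) =====
theorem create_get_class_details_qry_spec : Claim_equal_create_get_class_details_qry := by
  intro classkeys term_codes course_codes acad_career school college campus foe_description _hDom
  unfold Spec_create_get_class_details_qry
  unfold create_get_class_details_qry create_get_class_details_qry_alt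
  by_cases hC : classkeys.length > 0 ∨ term_codes.length > 0 ∨ course_codes.length > 0 ∨
      acad_career.isSome ∨ school.isSome ∨ college.isSome ∨ campus.isSome ∨
      foe_description.isSome
  · -- some filter present: the WHERE clause is built on both sides
    rw [if_pos hC]
    have hne : pvB_cores classkeys term_codes course_codes acad_career school college campus foe_description ≠ [] := by
      intro hnil
      unfold pvB_cores at hnil
      simp only [List.append_eq_nil_iff] at hnil
      obtain ⟨⟨⟨⟨⟨⟨⟨h1, h2⟩, h3⟩, h4⟩, h5⟩, h6⟩, h7⟩, h8⟩ := hnil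
      rcases hC with h | h | h | h | h | h | h | h
      · simp [pvB_groupOpt, List.isEmpty_iff] at h1; simp [h1] at h
      · simp [pvB_groupOpt, List.isEmpty_iff] at h2; simp [h2] at h
      · simp [pvB_groupOpt, List.isEmpty_iff] at h3; simp [h3] at h
      · cases acad_career <;> simp_all [pvB_scalarOpt]
      · cases school <;> simp_all [pvB_scalarOpt]
      · cases college <;> simp_all [pvB_scalarOpt]
      · cases campus <;> simp_all [pvB_scalarOpt]
      · cases foe_description <;> simp_all [pvB_scalarOpt]
    rw [if_neg (by simp [List.isEmpty_iff, hne])]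
    congr 1
    rw [pvA_group_eq, pvA_group_eq, pvA_group_eq, pvA_scalar_eq, pvA_scalar_eq,
        pvA_scalar_eq, pvA_scalar_eq, pvA_scalar_eq]
    have hflat : ("SELECT * FROM Class_details ".toList ++ "WHERE ( ".toList)
          ++ ((pvB_groupOpt "classkey".toList classkeys).map (· ++ "AND ".toList)).flatten
          ++ ((pvB_groupOpt "term_code".toList term_codes).map (· ++ "AND ".toList)).flatten
          ++ ((pvB_groupOpt "course_code".toList course_codes).map (· ++ "AND ".toList)).flatten
          ++ ((pvB_scalarOpt "course_acad_career".toList acad_career).map (· ++ "AND ".toList)).flatten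
          ++ ((pvB_scalarOpt "course_school".toList school).map (· ++ "AND ".toList)).flatten
          ++ ((pvB_scalarOpt "course_college".toList college).map (· ++ "AND ".toList)).flatten
          ++ ((pvB_scalarOpt "course_campus".toList campus).map (· ++ "AND ".toList)).flatten
          ++ ((pvB_scalarOpt "course_foe".toList foe_description).map (· ++ "AND ".toList)).flatten
        = ("SELECT * FROM Class_details ".toList ++ "WHERE ( ".toList)
          ++ ((pvB_cores classkeys term_codes course_codes acad_career school college campus foe_description).map (· ++ "AND ".toList)).flatten := by
      unfold pvB_cores
      simp [List.map_append, List.flatten_append, List.append_assoc]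
    simp only [List.append_assoc] at hflat ⊢
    rw [hflat, pv_flat_sep' "AND ".toList _ (by simpa using hne)]
    unfold pvA_trim4
    generalize PySem.Chars.join "AND ".toList
        (pvB_cores classkeys term_codes course_codes acad_career school college campus foe_description) = J
    simp only [← List.append_assoc]
    rw [pv_take_sub _ "AND ".toList 4 (by decide)]
  · -- no filters: both sides are the bare query
    rw [if_neg hC]
    push_neg at hC
    obtain ⟨h1, h2, h3, h4, h5, h6, h7, h8⟩ := hC
    have e1 : classkeys = [] := by simpa using h1
    have e2 : term_codes = [] := by simpa using h2
    have e3 : course_codes = [] := by simpa using h3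
    have e4 : acad_career = none := by simpa using h4
    have e5 : school = none := by simpa using h5
    have e6 : college = none := by simpa using h6
    have e7 : campus = none := by simpa using h7
    have e8 : foe_description = none := by simpa using h8
    subst e1 e2 e3 e4 e5 e6 e7 e8
    rw [if_pos (by decide)]
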